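-- pv_equiv track=rewrite | github.com/katyella/research-extract | scripts/extract.py | _dedupe_resources
-- ===== SOURCE A (Python) =====
-- def _dedupe_resources(resources: list) -> list:
--     """Deduplicate external resources by name, grouping by type."""
--     if not resources:
--         return []
--
--     seen = {}
--     for res in resources:
--         if not isinstance(res, dict):
--             continue
--         res_type = res.get('type', 'other')
--         name = res.get('name', '')
--         if not name:
--             continue
--
--         key = (res_type, name.lower().strip())
--         if key not in seen:
--             seen[key] = res
--         else:
--             existing = seen[key]
--             if len(str(res)) > len(str(existing)):
--                 seen[key] = res
--
--     result = sorted(seen.values(), key=lambda x: (x.get('type', 'z'), x.get('name', '').lower()))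
--     return result
-- ===== SOURCE B (Python) =====
-- def _dedupe_resources(resources: list) -> list:
--     """Deduplicate external resources by name, grouping by type (dict-free rewrite)."""
--     def _key(res):
--         return (res.get('type', 'other'), res.get('name', '').lower().strip())
--
--     cand = [r for r in resources if isinstance(r, dict) and r.get('name', '')]
--     winners = []
--     claimed = []
--     for i, r in enumerate(cand):
--         k = _key(r)
--         if k in claimed:
--             continue
--         claimed.append(k)
--         best = r
--         for r2 in cand[i + 1:]:
--             if _key(r2) == k and len(str(r2)) > len(str(best)):
--                 best = r2
--         winners.append(best)
--     return sorted(winners, key=lambda x: (x.get('type', 'z'), x.get('name', '').lower()))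
-- ===== Notes on version B (the rewrite author's own statement) =====
-- stated objective: alternative
-- what changed: B drops A's dict accumulator entirely: it filters the valid entries once, then for each entry whose key is not yet claimed finds the key's winner by a forward max-scan over the remaining entries, preserving first-seen key order, before the same final sort.
import Mathlib
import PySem

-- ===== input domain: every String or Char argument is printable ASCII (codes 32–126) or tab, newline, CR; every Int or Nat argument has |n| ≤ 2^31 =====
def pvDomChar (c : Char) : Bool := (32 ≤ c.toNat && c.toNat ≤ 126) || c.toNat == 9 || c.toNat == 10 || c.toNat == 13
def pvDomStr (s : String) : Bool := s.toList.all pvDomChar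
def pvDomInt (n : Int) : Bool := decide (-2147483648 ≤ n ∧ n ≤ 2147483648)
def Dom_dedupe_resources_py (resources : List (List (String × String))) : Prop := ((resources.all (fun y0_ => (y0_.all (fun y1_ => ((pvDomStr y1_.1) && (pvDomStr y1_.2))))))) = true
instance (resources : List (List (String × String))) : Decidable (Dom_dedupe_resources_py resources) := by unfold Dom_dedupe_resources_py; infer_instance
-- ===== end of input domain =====

-- B removes A's dict accumulator: each key's winner is found by a forward max-scan from its
-- first occurrence (objective: alternative decomposition, same exact result).
-- Shared helpers (both Pythons use res.get, name.lower().strip() and len(str(res)) identically).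

-- res.get(k, dflt) on the association list (first match), exact Python dict.get
def pvGetD (res : List (String × String)) (k dflt : String) : String :=
  (PySem.Dict.mk res).getD k dflt

-- len(repr(s)) for s over the Dom alphabet (printable ASCII + tab/newline/CR):
-- CPython quotes with ' unless s contains ' and not "; escapes \\ \t \n \r and the quote char.
def pvReprLenStr (s : String) : Nat :=
  let cs := s.toList
  let q : Char := if '\'' ∈ cs ∧ ¬ '"' ∈ cs then '"' else '\''
  2 + (cs.map (fun c =>
        if c = '\\' ∨ c = '\t' ∨ c = '\n' ∨ c = '\r' ∨ c = q then 2 else 1)).sum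

-- len(str(res)) for a dict of strings: "{" k ": " v ", " … "}"  (exact on the Dom alphabet)
def pvStrLen (res : List (String × String)) : Nat :=
  if res = [] then 2
  else 2 + (res.map (fun p => pvReprLenStr p.1 + 2 + pvReprLenStr p.2)).sum + 2 * (res.length - 1)

-- the dedup key (res.get('type','other'), res.get('name','').lower().strip())
def pvKey (res : List (String × String)) : String × String :=
  (pvGetD res "type" "other", PySem.Str.strip (PySem.Str.lower (pvGetD res "name" "")))

-- ===== PORT A =====
-- loop body of A (the isinstance check is vacuous under the type convention: every element is a dict)
def pvStepA (seen : PySem.Dict (String × String) (List (String × String)))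
    (res : List (String × String)) : PySem.Dict (String × String) (List (String × String)) :=
  let name := pvGetD res "name" ""
  if name = "" then seen
  else
    let key := (pvGetD res "type" "other", PySem.Str.strip (PySem.Str.lower name))
    if seen.contains key = false then seen.insert key res
    else
      let existing := seen.getD key []
      if pvStrLen existing < pvStrLen res then seen.insert key res else seen

def dedupe_resources_py (resources : List (List (String × String))) : List (List (String × String)) :=
  if resources = [] then []
  else
    let seen := resources.foldl pvStepA PySem.Dict.empty
    PySem.List.sorted2 seen.values
      (fun x => pvGetD x "type" "z")
      (fun x => PySem.Str.lower (pvGetD x "name" ""))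

-- ===== PORT B =====
-- inner loop: best over the rest of cand, strict improvement only
def pvBestB (k : String × String) (rest : List (List (String × String)))
    (best : List (String × String)) : List (String × String) :=
  rest.foldl (fun best r2 =>
    if pvKey r2 = k ∧ pvStrLen best < pvStrLen r2 then r2 else best) best

-- outer loop over cand with the claimed-keys list
def pvScanB : List (List (String × String)) → List (String × String) → List (List (String × String))
  | [], _ => []
  | r :: rest, claimed =>
    let k := pvKey r
    if k ∈ claimed then pvScanB rest claimed
    else pvBestB k rest r :: pvScanB rest (claimed ++ [k])

def dedupe_resources_py_alt (resources : List (List (String × String))) : List (List (String × String)) :=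
  let cand := resources.filter (fun r => pvGetD r "name" "" ≠ "")
  let winners := pvScanB cand []
  PySem.List.sorted2 winners
    (fun x => pvGetD x "type" "z")
    (fun x => PySem.Str.lower (pvGetD x "name" ""))

-- ===== PRECONDITION & SPEC =====
def Spec_dedupe_resources_py (resources : List (List (String × String))) (out : List (List (String × String))) : Prop := out = dedupe_resources_py_alt resources
instance (resources : List (List (String × String))) (out : List (List (String × String))) : Decidable (Spec_dedupe_resources_py resources out) := by unfold Spec_dedupe_resources_py; infer_instance

-- ===== CLAIM (what is proved, stated in full; the proofs are below) =====
def Claim_equal_dedupe_resources_py : Prop := ∀ (resources : List (List (String × String))), Dom_dedupe_resources_py resources → Spec_dedupe_resources_py resources (dedupe_resources_py resources)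

-- ===== LEMMAS AND PROOFS =====

-- A's core step (after the name-empty skip), keyed by pvKey
def pvCore (seen : PySem.Dict (String × String) (List (String × String)))
    (res : List (String × String)) : PySem.Dict (String × String) (List (String × String)) :=
  let key := pvKey res
  if seen.contains key = false then seen.insert key res
  else
    let existing := seen.getD key []
    if pvStrLen existing < pvStrLen res then seen.insert key res else seen

-- proof-side variant of pvScanB that keeps the key with each winner
def pvScanP : List (List (String × String)) → List (String × String) →
    List ((String × String) × List (String × String))
  | [], _ => []
  | r :: rest, claimed =>
    let k := pvKey r
    if k ∈ claimed then pvScanP rest claimed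
    else (k, pvBestB k rest r) :: pvScanP rest (claimed ++ [k])

lemma scanB_eq_map_scanP (l : List (List (String × String))) (claimed : List (String × String)) :
    pvScanB l claimed = (pvScanP l claimed).map Prod.snd := by
  induction l generalizing claimed with
  | nil => rfl
  | cons r rest ih =>
    simp only [pvScanB, pvScanP]
    split_ifs with h
    · exact ih claimed
    · simp [ih]

lemma stepA_eq (seen : PySem.Dict (String × String) (List (String × String)))
    (res : List (String × String)) :
    pvStepA seen res = if pvGetD res "name" "" ≠ "" then pvCore seen res else seen := by
  simp only [pvStepA, pvCore, pvKey]
  by_cases h : pvGetD res "name" "" = "" <;> simp [h]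

-- insert of the present value is a no-op (Nodup keys)
lemma insert_getD_self (d : PySem.Dict (String × String) (List (String × String)))
    (k : String × String) (hc : d.contains k = true) (hnd : d.keys.Nodup) :
    d.insert k (d.getD k []) = d := by
  apply PySem.Dict.ext
  rw [PySem.Dict.items_insert_of_contains _ _ hc]
  conv_rhs => rw [show d.items = d.items.map id from (List.map_id _).symm]
  apply List.map_congr_left
  intro p hp
  by_cases hpk : (p.1 == k) = true
  · have hk : p.1 = k := by simpa using hpk
    have h2 : (p.1, p.2) ∈ d.items := by simpa using hp
    have hv := PySem.Dict.getD_of_mem_items d h2 hnd []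
    simp [← hk, hv]
  · simp [hpk]

-- the main invariant: A's dict fold vs B's scan
lemma main_inv (l : List (List (String × String)))
    (d : PySem.Dict (String × String) (List (String × String))) (hnd : d.keys.Nodup) :
    (l.foldl pvCore d).items
      = d.items.map (fun p => (p.1, pvBestB p.1 l p.2)) ++ pvScanP l d.keys := by
  induction l generalizing d with
  | nil =>
    simp only [List.foldl_nil, pvScanP, List.append_nil]
    conv_lhs => rw [show d.items = d.items.map id from (List.map_id _).symm]
    apply List.map_congr_left
    intro p _; simp [pvBestB]
  | cons r rest ih =>
    have hkeymem : ∀ p ∈ d.items, p.1 ∈ d.keys := fun p hp => PySem.Dict.mem_keys_of_mem_items d hp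
    by_cases hc : d.contains (pvKey r) = true
    · -- key already present: entry updated in place (possibly unchanged)
      have hmem : pvKey r ∈ d.keys := (PySem.Dict.contains_iff_mem_keys d _).1 hc
      have hstep : pvCore d r
          = d.insert (pvKey r) (if pvStrLen (d.getD (pvKey r) []) < pvStrLen r then r
                                else d.getD (pvKey r) []) := by
        simp only [pvCore, hc, Bool.true_eq_false, if_false]
        by_cases h : pvStrLen (d.getD (pvKey r) []) < pvStrLen r
        · simp [h]
        · simp only [if_neg h]
          exact (insert_getD_self d _ hc hnd).symm
      have hnd' : (d.insert (pvKey r)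
          (if pvStrLen (d.getD (pvKey r) []) < pvStrLen r then r
           else d.getD (pvKey r) [])).keys.Nodup := by
        rw [PySem.Dict.keys_insert_of_contains _ _ hc]; exact hnd
      rw [List.foldl_cons, hstep, ih _ hnd']
      rw [PySem.Dict.items_insert_of_contains _ _ hc,
          PySem.Dict.keys_insert_of_contains _ _ hc]
      have hscan : pvScanP (r :: rest) d.keys = pvScanP rest d.keys := by
        simp only [pvScanP]; rw [if_pos hmem]
      rw [hscan, List.map_map]
      congr 1
      apply List.map_congr_left
      intro p hp
      by_cases hpk : p.1 = pvKey r
      · -- the updated entry: one step of the per-key fold absorbed into pvBestB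
        have hval : p.2 = d.getD (pvKey r) [] := by
          have h2 : (p.1, p.2) ∈ d.items := by simpa using hp
          rw [← hpk]
          exact (PySem.Dict.getD_of_mem_items d h2 hnd []).symm
        simp only [Function.comp, hpk, beq_self_eq_true, if_pos]
        simp only [pvBestB, List.foldl_cons, hval]
        by_cases hlt : pvStrLen (d.getD (pvKey r) []) < pvStrLen r
        · simp [hlt]
        · simp [hlt]
      · have hbeq : (p.1 == pvKey r) = false := by simpa using hpk
        simp only [Function.comp, hbeq, if_neg Bool.false_ne_true]
        congr 1
        simp only [pvBestB, List.foldl_cons]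
        rw [if_neg]
        rintro ⟨hk, -⟩; exact hpk hk.symm
    · -- fresh key: appended, claims the key
      have hcf : d.contains (pvKey r) = false := by
        cases h : d.contains (pvKey r) with
        | false => rfl
        | true => exact absurd h hc
      have hnmem : pvKey r ∉ d.keys := fun hm =>
        hc ((PySem.Dict.contains_iff_mem_keys d _).2 hm)
      have hstep : pvCore d r = d.insert (pvKey r) r := by
        simp [pvCore, hcf]
      have hnd' : (d.insert (pvKey r) r).keys.Nodup := by
        rw [PySem.Dict.keys_insert_of_not_contains _ _ hcf]
        apply List.Nodup.append hnd (List.nodup_singleton _)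
        intro a ha hb
        rw [List.mem_singleton] at hb
        exact hnmem (hb ▸ ha)
      rw [List.foldl_cons, hstep, ih _ hnd']
      rw [PySem.Dict.items_insert_of_not_contains _ _ hcf,
          PySem.Dict.keys_insert_of_not_contains _ _ hcf]
      have hscan : pvScanP (r :: rest) d.keys
          = (pvKey r, pvBestB (pvKey r) rest r) :: pvScanP rest (d.keys ++ [pvKey r]) := by
        simp only [pvScanP]; rw [if_neg hnmem]
      rw [hscan, List.map_append]
      simp only [List.map_cons, List.map_nil]
      rw [List.append_assoc]
      congr 1
      · apply List.map_congr_left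
        intro p hp
        congr 1
        simp only [pvBestB, List.foldl_cons]
        rw [if_neg]
        rintro ⟨hk, -⟩
        exact hnmem (hk ▸ hkeymem p hp)

lemma values_fold_eq_scan (l : List (List (String × String))) :
    (l.foldl pvCore PySem.Dict.empty).values = pvScanB l [] := by
  have h := main_inv l PySem.Dict.empty PySem.Dict.nodup_keys_empty
  have hv : (l.foldl pvCore PySem.Dict.empty).values
      = (l.foldl pvCore PySem.Dict.empty).items.map Prod.snd := rfl
  rw [hv, h]
  have : PySem.Dict.empty.items
      (κ := String × String) (ν := List (String × String)) = [] := rfl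
  rw [this]
  simp only [List.map_nil, List.nil_append]
  rw [scanB_eq_map_scanP]
  have hk : (PySem.Dict.empty
      (κ := String × String) (ν := List (String × String))).keys = [] := rfl
  rw [hk]

lemma foldA_eq_foldCore (resources : List (List (String × String))) :
    resources.foldl pvStepA PySem.Dict.empty
      = (resources.filter (fun r => pvGetD r "name" "" ≠ "")).foldl pvCore PySem.Dict.empty := by
  rw [← PySem.List.foldl_ite_eq_foldl_filter]
  exact PySem.List.foldl_congr_mem _ _ _ _ (fun acc x _ => stepA_eq acc x)

-- ===== VERDICT (by name: the statement is the Claim_ definition above) =====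
theorem dedupe_resources_py_spec : Claim_equal_dedupe_resources_py := by
  intro resources _
  unfold Spec_dedupe_resources_py
  by_cases h : resources = []
  · subst h; rfl
  · simp only [dedupe_resources_py, dedupe_resources_py_alt, if_neg h]
    rw [foldA_eq_foldCore, values_fold_eq_scan]
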